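-- pv_equiv track=rewrite | github.com/johnbros/mlb | src/parseretrosheet/parse_pbp.py | split_by_game
-- ===== SOURCE A (Python) =====
-- def split_by_game(lines):
--     games = []
--     current_game = []
--
--     for line in lines:
--         if line.startswith("id,"):
--             if current_game:
--                 games.append(current_game)
--                 current_game = []
--         current_game.append(line)
--
--     # Add the last game
--     if current_game:
--         games.append(current_game)
--
--     return games
-- ===== SOURCE B (Python) =====
-- def split_by_game(lines):
--     # Index-based: scan to the next "id," boundary and emit a slice per game.
--     games = []
--     n = len(lines)
--     i = 0
--     while i < n:
--         j = i + 1
--         while j < n and not lines[j].startswith("id,"):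
--             j += 1
--         games.append(lines[i:j])
--         i = j
--     return games
-- ===== Notes on version B (the rewrite author's own statement) =====
-- stated objective: alternative
-- what changed: B replaces A's single-pass accumulator (append each line to a current group, flush at 'id,' markers) by an index scan: for each group start it scans forward to the next 'id,' boundary and emits the slice lines[i:j], so no current-group list is ever built up element by element.
import Mathlib
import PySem

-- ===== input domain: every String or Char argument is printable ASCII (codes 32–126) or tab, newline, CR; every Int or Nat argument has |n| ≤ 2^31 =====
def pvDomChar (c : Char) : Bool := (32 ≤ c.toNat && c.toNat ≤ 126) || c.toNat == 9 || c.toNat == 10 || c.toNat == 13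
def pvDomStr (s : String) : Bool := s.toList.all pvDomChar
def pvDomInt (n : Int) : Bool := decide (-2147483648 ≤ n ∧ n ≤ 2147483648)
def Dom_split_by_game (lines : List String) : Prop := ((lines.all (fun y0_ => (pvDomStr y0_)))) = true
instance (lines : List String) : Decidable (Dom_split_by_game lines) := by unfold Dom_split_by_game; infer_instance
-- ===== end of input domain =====

-- B replaces A's accumulator pass by an index scan emitting one slice per game;
-- alternative decomposition, same O(n) cost.

-- ===== PORT A =====
-- loop body of A: open a new group at an "id," line when the current group is nonempty
def pvStepA (st : List (List String) × List String) (line : String) :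
    List (List String) × List String :=
  let st1 :=
    if PySem.Str.startswith line "id," then
      (if st.2 ≠ [] then (st.1 ++ [st.2], ([] : List String)) else st)
    else st
  (st1.1, st1.2 ++ [line])

def split_by_game (lines : List String) : List (List String) :=
  let s := lines.foldl pvStepA ([], [])
  if s.2 ≠ [] then s.1 ++ [s.2] else s.1

-- ===== PORT B =====
-- inner while loop of B: advance j past non-"id," lines (lines[j] with j < n, read via getD)
def pvFindNext (lines : List String) (n j : Nat) : Nat :=
  if h : j < n ∧ ¬ PySem.Str.startswith (lines.getD j "") "id," then
    pvFindNext lines n (j + 1)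
  else j
termination_by n - j
decreasing_by omega

-- needed by pvGo's termination proof
theorem pvFindNext_ge (lines : List String) (n j : Nat) : j ≤ pvFindNext lines n j := by
  rw [pvFindNext]
  split
  · exact le_trans (Nat.le_succ j) (pvFindNext_ge lines n (j + 1))
  · exact le_refl j
termination_by n - j
decreasing_by omega

-- outer while loop of B: one slice lines[i:j] per game
def pvGo (lines : List String) (n i : Nat) : List (List String) :=
  if h : i < n then
    let j := pvFindNext lines n (i + 1)
    PySem.List.slice lines (some (i : Int)) (some (j : Int)) :: pvGo lines n j
  else []
termination_by n - i
decreasing_by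
  have := pvFindNext_ge lines n (i + 1); omega

def split_by_game_alt (lines : List String) : List (List String) :=
  pvGo lines lines.length 0

-- ===== PRECONDITION & SPEC =====
def Spec_split_by_game (lines : List String) (out : List (List String)) : Prop := out = split_by_game_alt lines
instance (lines : List String) (out : List (List String)) : Decidable (Spec_split_by_game lines out) := by unfold Spec_split_by_game; infer_instance

-- ===== CLAIM =====
def Claim_equal_split_by_game : Prop := ∀ (lines : List String), Dom_split_by_game lines → Spec_split_by_game lines (split_by_game lines)

-- ===== LEMMAS AND PROOFS =====

-- a line that does not start a new game
def pvNoId (x : String) : Bool := !(PySem.Str.startswith x "id,")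

-- common characterisation: the list of games, one started at each "id," boundary
def pvS : List String → List (List String)
  | [] => []
  | l :: ls => (l :: ls.takeWhile pvNoId) :: pvS (ls.dropWhile pvNoId)
termination_by ls => ls.length
decreasing_by
  simpa using Nat.lt_succ_of_le (List.length_dropWhile_le pvNoId _)

theorem pvA_inv (ls : List String) : ∀ (games : List (List String)) (cur : List String),
    cur ≠ [] →
    (let s := ls.foldl pvStepA (games, cur); if s.2 ≠ [] then s.1 ++ [s.2] else s.1)
      = games ++ (cur ++ ls.takeWhile pvNoId) :: pvS (ls.dropWhile pvNoId) := by
  induction ls with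
  | nil => intro games cur h; simp [pvS, h]
  | cons l ls ih =>
    intro games cur h
    by_cases hp : PySem.Chars.startswith l.toList ['i', 'd', ','] = true
    · have h1 : List.foldl pvStepA (games, cur) (l :: ls)
          = List.foldl pvStepA (games ++ [cur], [l]) ls := by
        simp [List.foldl, pvStepA, hp, h]
      have h2 := ih (games ++ [cur]) [l] (by simp)
      simp only [h1, h2]
      simp [List.takeWhile, List.dropWhile, pvNoId, hp, pvS]
    · have h1 : List.foldl pvStepA (games, cur) (l :: ls)
          = List.foldl pvStepA (games, cur ++ [l]) ls := by
        simp [List.foldl, pvStepA, hp]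
      have h2 := ih games (cur ++ [l]) (by simp)
      simp only [h1, h2]
      simp [List.takeWhile, List.dropWhile, pvNoId, hp]

theorem pvA_eq_pvS (lines : List String) : split_by_game lines = pvS lines := by
  cases lines with
  | nil => simp [split_by_game, pvS]
  | cons l ls =>
    have h0 : pvStepA ([], []) l = ([], [l]) := by
      by_cases hp : PySem.Chars.startswith l.toList ['i', 'd', ','] = true <;>
        simp [pvStepA, hp]
    have h1 := pvA_inv ls ([] : List (List String)) [l] (by simp)
    show (let s := List.foldl pvStepA ([], []) (l :: ls);
        if s.2 ≠ [] then s.1 ++ [s.2] else s.1) = pvS (l :: ls)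
    simp only [List.foldl, h0, h1]
    simp [pvS]

-- pvFindNext from j finds the end of the run of non-"id," lines starting at j
theorem pvFindNext_eq (lines : List String) (j : Nat) :
    pvFindNext lines lines.length j
      = j + ((lines.drop j).takeWhile pvNoId).length := by
  rw [pvFindNext]
  by_cases hj : j < lines.length
  · have hdrop : lines.drop j = lines[j] :: lines.drop (j + 1) :=
      (List.drop_eq_getElem_cons hj)
    have hget : lines.getD j "" = lines[j] := List.getD_eq_getElem lines "" hj
    by_cases hp : PySem.Chars.startswith lines[j].toList ['i', 'd', ','] = true
    · have hb : pvNoId lines[j] = false := by simp [pvNoId, hp]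
      have hc : ¬ (j < lines.length ∧ ¬ PySem.Str.startswith (lines.getD j "") "id," = true) := by
        rw [hget]; simp [hp]
      rw [dif_neg hc, hdrop, List.takeWhile_cons, if_neg (by simp [hb])]
      simp
    · have hb : pvNoId lines[j] = true := by simp [pvNoId, hp]
      have hcond : j < lines.length ∧ ¬ PySem.Str.startswith (lines.getD j "") "id," = true := by
        rw [hget]; exact ⟨hj, by simp [hp]⟩
      rw [dif_pos hcond, pvFindNext_eq lines (j + 1), hdrop, List.takeWhile_cons,
        if_pos (by simp [hb]), List.length_cons]
      omega
  · have hc : ¬ (j < lines.length ∧ ¬ PySem.Str.startswith (lines.getD j "") "id," = true) := by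
      intro h; exact hj h.1
    rw [dif_neg hc]
    simp [List.drop_eq_nil_of_le (le_of_not_gt hj)]
termination_by lines.length - j
decreasing_by omega

theorem pvTakeLen {p : String → Bool} (xs : List String) :
    xs.take (xs.takeWhile p).length = xs.takeWhile p := by
  induction xs with
  | nil => simp
  | cons a as ih =>
    by_cases hp : p a = true
    · simp [List.takeWhile, hp, ih]
    · simp [List.takeWhile, hp]

theorem pvDropLen {p : String → Bool} (xs : List String) :
    xs.drop (xs.takeWhile p).length = xs.dropWhile p := by
  induction xs with
  | nil => simp
  | cons a as ih =>
    by_cases hp : p a = true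
    · simp [List.takeWhile, List.dropWhile, hp, ih]
    · simp [List.takeWhile, List.dropWhile, hp]

theorem pvGo_eq_pvS (lines : List String) (i : Nat) :
    pvGo lines lines.length i = pvS (lines.drop i) := by
  rw [pvGo]
  by_cases hi : i < lines.length
  · rw [dif_pos hi]
    have hdrop : lines.drop i = lines[i] :: lines.drop (i + 1) :=
      (List.drop_eq_getElem_cons hi)
    have hrec := pvGo_eq_pvS lines (pvFindNext lines lines.length (i + 1))
    have hj : pvFindNext lines lines.length (i + 1)
        = i + 1 + ((lines.drop (i + 1)).takeWhile pvNoId).length :=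
      pvFindNext_eq lines (i + 1)
    show PySem.List.slice lines (some (i : Int))
          (some ((pvFindNext lines lines.length (i + 1) : Nat) : Int))
        :: pvGo lines lines.length (pvFindNext lines lines.length (i + 1))
      = pvS (lines.drop i)
    rw [PySem.List.slice_natCast, hrec, hj]
    have hsub : i + 1 + ((lines.drop (i + 1)).takeWhile pvNoId).length - i
        = ((lines.drop (i + 1)).takeWhile pvNoId).length + 1 := by omega
    have hd2 : lines.drop (i + 1 + ((lines.drop (i + 1)).takeWhile pvNoId).length)
        = (lines.drop (i + 1)).dropWhile pvNoId := by
      rw [← pvDropLen (p := pvNoId) (lines.drop (i + 1)), List.drop_drop]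
    rw [hsub, hd2, hdrop, List.take_succ_cons, pvTakeLen]
    conv_rhs => rw [pvS]
  · rw [dif_neg hi]
    rw [List.drop_eq_nil_of_le (le_of_not_gt hi)]
    rw [pvS]
termination_by lines.length - i
decreasing_by
  have := pvFindNext_ge lines lines.length (i + 1); omega

theorem pvB_eq_pvS (lines : List String) : split_by_game_alt lines = pvS lines := by
  simpa [split_by_game_alt] using pvGo_eq_pvS lines 0

-- ===== VERDICT =====
theorem split_by_game_spec : Claim_equal_split_by_game := by
  intro lines _
  show split_by_game lines = split_by_game_alt lines
  rw [pvA_eq_pvS, pvB_eq_pvS]
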